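-- pv_equiv track=rewrite | github.com/michaelsamsonjacobs-cpu/chess | src/chessguard/features/extractor.py | _novelty_ply
-- ===== SOURCE A (Python) =====
-- from typing import Dict, Iterable, List, Optional
--
-- OPENING_BOOK = {
--     ("e4", "e5", "Nf3", "Nc6", "Bb5"),  # Ruy Lopez
--     ("d4", "d5", "c4", "e6", "Nc3"),  # Queen's Gambit Declined
--     ("c4", "e5", "Nc3", "Nf6"),  # English
--     ("e4", "c5", "Nf3", "d6", "d4", "cxd4", "Nxd4", "Nf6"),  # Sicilian Najdorf mainline prefix
--     ("d4", "Nf6", "c4", "g6", "Nc3", "Bg7"),  # King's Indian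
-- }
--
-- def _novelty_ply(tokens: List[str]) -> int:
--     if not tokens:
--         return 0
--     prefixes = {line[:index] for line in OPENING_BOOK for index in range(1, len(line) + 1)}
--     for index in range(len(tokens)):
--         prefix = tuple(tokens[: index + 1])
--         if prefix not in prefixes:
--             return index + 1
--     return len(tokens)
-- ===== SOURCE B (Python) =====
-- OPENING_BOOK = {
--     ("e4", "e5", "Nf3", "Nc6", "Bb5"),  # Ruy Lopez
--     ("d4", "d5", "c4", "e6", "Nc3"),  # Queen's Gambit Declined
--     ("c4", "e5", "Nc3", "Nf6"),  # English
--     ("e4", "c5", "Nf3", "d6", "d4", "cxd4", "Nxd4", "Nf6"),  # Sicilian Najdorf mainline prefix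
--     ("d4", "Nf6", "c4", "g6", "Nc3", "Bg7"),  # King's Indian
-- }
--
-- def _novelty_ply(tokens):
--     if not tokens:
--         return 0
--     active = set(OPENING_BOOK)
--     for index in range(len(tokens)):
--         active = {line for line in active
--                   if len(line) > index and line[index] == tokens[index]}
--         if not active:
--             return index + 1
--     return len(tokens)
-- ===== Notes on version B (the rewrite author's own statement) =====
-- stated objective: alternative
-- what changed: Instead of precomputing the set of all nonempty prefixes of every book line and testing each game prefix for membership, B threads a shrinking set of still-matching candidate lines, narrowing it one ply at a time and returning when it empties.
import Mathlib
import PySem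

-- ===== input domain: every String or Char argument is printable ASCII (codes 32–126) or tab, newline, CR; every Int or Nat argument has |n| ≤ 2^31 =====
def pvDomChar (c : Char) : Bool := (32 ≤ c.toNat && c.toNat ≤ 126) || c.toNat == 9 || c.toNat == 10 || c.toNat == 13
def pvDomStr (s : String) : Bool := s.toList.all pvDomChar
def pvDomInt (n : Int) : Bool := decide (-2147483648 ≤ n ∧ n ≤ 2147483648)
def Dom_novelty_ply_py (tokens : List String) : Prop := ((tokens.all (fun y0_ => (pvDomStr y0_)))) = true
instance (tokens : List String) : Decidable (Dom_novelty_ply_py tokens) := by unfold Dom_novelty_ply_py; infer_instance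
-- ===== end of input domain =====

-- B replaces the precomputed set of all book-line prefixes by a per-ply shrinking set of
-- candidate lines (alternative decomposition; same observable behaviour).

-- ===== PORT A =====
-- OPENING_BOOK (a set of tuples; only membership of its prefix set is ever used)
def pvBook : List (List String) :=
  [["e4", "e5", "Nf3", "Nc6", "Bb5"],
   ["d4", "d5", "c4", "e6", "Nc3"],
   ["c4", "e5", "Nc3", "Nf6"],
   ["e4", "c5", "Nf3", "d6", "d4", "cxd4", "Nxd4", "Nf6"],
   ["d4", "Nf6", "c4", "g6", "Nc3", "Bg7"]]

-- prefixes = {line[:index] for line in OPENING_BOOK for index in range(1, len(line)+1)}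
def pvPrefixes : PySem.Set (List String) :=
  PySem.Set.ofList (pvBook.flatMap (fun line =>
    (PySem.List.pyRange 1 ((line.length : Int) + 1) 1).map
      (fun j => PySem.List.slice line none (some j))))

-- for index in range(len(tokens)): if tuple(tokens[:index+1]) not in prefixes: return index+1
def pvLoopA (tokens : List String) (i : Nat) : Int :=
  if h : i < tokens.length then
    let pre := PySem.List.slice tokens none (some ((i : Int) + 1))
    if PySem.Set.contains pvPrefixes pre then pvLoopA tokens (i + 1)
    else (i : Int) + 1
  else (tokens.length : Int)
termination_by tokens.length - i

def novelty_ply_py (tokens : List String) : Int :=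
  if tokens = [] then 0 else pvLoopA tokens 0

-- ===== PORT B =====
-- active = {line for line in active if len(line) > index and line[index] == tokens[index]};
-- active is a PySem.Set (distinct lines); the comprehension is a filter, which keeps it distinct.
def pvLoopB (tokens : List String) (active : PySem.Set (List String)) (i : Nat) : Int :=
  if h : i < tokens.length then
    let active' := active.filter
      (fun line => decide (i < line.length) && (line.getD i "" == tokens.getD i ""))
    if active' = [] then (i : Int) + 1
    else pvLoopB tokens active' (i + 1)
  else (tokens.length : Int)
termination_by tokens.length - i

def novelty_ply_py_alt (tokens : List String) : Int :=
  if tokens = [] then 0 else pvLoopB tokens pvBook 0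

-- ===== PRECONDITION & SPEC =====
def Spec_novelty_ply_py (tokens : List String) (out : Int) : Prop := out = novelty_ply_py_alt tokens
instance (tokens : List String) (out : Int) : Decidable (Spec_novelty_ply_py tokens out) := by unfold Spec_novelty_ply_py; infer_instance

-- ===== CLAIM (what is proved, stated in full; the proofs are below) =====
def Claim_equal_novelty_ply_py : Prop := ∀ (tokens : List String), Dom_novelty_ply_py tokens → Spec_novelty_ply_py tokens (novelty_ply_py tokens)

-- ===== LEMMAS AND PROOFS =====

-- the invariant predicate: line still matches the first i plies (and is long enough)
def pvQ (tokens : List String) (i : Nat) (l : List String) : Bool :=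
  decide (i ≤ l.length) && (l.take i == tokens.take i)

lemma pvQ_zero (tokens : List String) : pvBook.filter (pvQ tokens 0) = pvBook := by
  simp [pvQ]

-- one filtering step refines pvQ i into pvQ (i+1)
lemma pvQ_step (tokens : List String) (i : Nat) (hi : i < tokens.length) (l : List String) :
    (pvQ tokens i l && (decide (i < l.length) && (l.getD i "" == tokens.getD i ""))) =
      pvQ tokens (i + 1) l := by
  rw [Bool.eq_iff_iff]
  simp only [pvQ, Bool.and_assoc, Bool.and_eq_true, decide_eq_true_eq, beq_iff_eq]
  constructor
  · rintro ⟨h1, h2, h3, h4⟩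
    refine ⟨by omega, ?_⟩
    rw [List.take_add_one, List.take_add_one, h2]
    have : l[i]? = tokens[i]? := by
      rw [List.getElem?_eq_getElem h3, List.getElem?_eq_getElem hi]
      simpa [List.getD_eq_getElem?_getD, List.getElem?_eq_getElem h3,
        List.getElem?_eq_getElem hi] using h4
    rw [this]
  · rintro ⟨h1, h2⟩
    have h3 : i < l.length := by omega
    have htk : l.take i = tokens.take i := by
      have := congrArg (List.take i) h2
      simpa [List.take_take, Nat.min_def, Nat.le_succ] using this
    have hel : l[i]? = tokens[i]? := by
      have := congrArg (fun xs => xs[i]?) h2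
      simpa [List.getElem?_take, hi, h3] using this
    refine ⟨by omega, htk, h3, ?_⟩
    have := hel
    rw [List.getElem?_eq_getElem h3, List.getElem?_eq_getElem hi] at this
    simp [List.getD_eq_getElem?_getD, List.getElem?_eq_getElem h3,
      List.getElem?_eq_getElem hi, Option.some.inj this]

-- membership of tokens[:i+1] in the prefix set ↔ some book line matches through ply i
lemma pv_mem_prefixes (tokens : List String) (i : Nat) (hi : i < tokens.length) :
    (tokens.take (i + 1) ∈ pvPrefixes) ↔ ∃ l ∈ pvBook, pvQ tokens (i + 1) l = true := by
  unfold pvPrefixes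
  rw [PySem.Set.mem_ofList, List.mem_flatMap]
  constructor
  · rintro ⟨l, hl, hmem⟩
    rw [List.mem_map] at hmem
    obtain ⟨j, hj, hslice⟩ := hmem
    rw [PySem.List.mem_pyRange_one] at hj
    rw [PySem.List.slice_to l (show (0:Int) ≤ j from by omega)] at hslice
    have hlen : (tokens.take (i + 1)).length = i + 1 := by
      simp; omega
    have hjl : j.toNat ≤ l.length := by omega
    have : min j.toNat l.length = i + 1 := by
      rw [← List.length_take, hslice]; exact hlen
    have hje : j.toNat = i + 1 := by omega
    refine ⟨l, hl, ?_⟩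
    simp only [pvQ, Bool.and_eq_true, decide_eq_true_eq, beq_iff_eq]
    exact ⟨by omega, by rw [hje] at hslice; exact hslice⟩
  · rintro ⟨l, hl, hq⟩
    simp only [pvQ, Bool.and_eq_true, decide_eq_true_eq, beq_iff_eq] at hq
    refine ⟨l, hl, ?_⟩
    rw [List.mem_map]
    refine ⟨((i : Int) + 1), ?_, ?_⟩
    · rw [PySem.List.mem_pyRange_one]; constructor <;> [omega; exact_mod_cast by omega]
    · rw [PySem.List.slice_to l (show (0:Int) ≤ (i:Int)+1 from by omega)]
      simpa using hq.2

lemma pv_loop_eq (tokens : List String) : ∀ (n i : Nat), tokens.length - i = n →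
    pvLoopA tokens i = pvLoopB tokens (pvBook.filter (pvQ tokens i)) i := by
  intro n
  induction n with
  | zero =>
    intro i h
    have hi : ¬ i < tokens.length := by omega
    rw [pvLoopA, pvLoopB]
    simp [hi]
  | succ n ih =>
    intro i h
    have hi : i < tokens.length := by omega
    rw [pvLoopA, pvLoopB]
    simp only [hi, dif_pos]
    have hslice : PySem.List.slice tokens none (some ((i : Int) + 1)) = tokens.take (i + 1) := by
      rw [PySem.List.slice_to tokens (show (0:Int) ≤ (i:Int)+1 from by omega)]
      norm_num
    have hfilter : (pvBook.filter (pvQ tokens i)).filter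
        (fun line => decide (i < line.length) && (line.getD i "" == tokens.getD i "")) =
        pvBook.filter (pvQ tokens (i + 1)) := by
      rw [List.filter_filter]
      exact List.filter_congr (fun l _ => by
        rw [Bool.and_comm]; exact pvQ_step tokens i hi l)
    rw [hslice, hfilter]
    have hcon : PySem.Set.contains pvPrefixes (tokens.take (i + 1)) =
        ((tokens.take (i + 1)) ∈ pvPrefixes : Bool) := by
      simp [PySem.Set.contains]
    by_cases hm : tokens.take (i + 1) ∈ pvPrefixes
    · have hne : pvBook.filter (pvQ tokens (i + 1)) ≠ [] := by
        rw [Ne, List.filter_eq_nil_iff]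
        push Not
        obtain ⟨l, hl, hq⟩ := (pv_mem_prefixes tokens i hi).mp hm
        exact ⟨l, hl, by simp [hq]⟩
      rw [hcon]
      simp only [hm, decide_true, if_true, hne]
      exact ih (i + 1) (by omega)
    · have hnil : pvBook.filter (pvQ tokens (i + 1)) = [] := by
        rw [List.filter_eq_nil_iff]
        intro l hl hq
        exact hm ((pv_mem_prefixes tokens i hi).mpr ⟨l, hl, hq⟩)
      rw [hcon]
      simp [hm, hnil]

-- ===== VERDICT (by name: the statement is the Claim_ definition above) =====
theorem novelty_ply_py_spec : Claim_equal_novelty_ply_py := by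
  intro tokens _
  unfold Spec_novelty_ply_py novelty_ply_py novelty_ply_py_alt
  by_cases h : tokens = []
  · simp [h]
  · simp only [h]
    rw [pv_loop_eq tokens (tokens.length - 0) 0 rfl, pvQ_zero]
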